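-- pv_equiv track=rewrite | github.com/Nyapal/tweetgen | histogram.py | tup_list
-- ===== SOURCE A (Python) =====
-- def tup_list(lines):
--     #LIST OF TUPLES
--     tup_list = []
--
--     for word in lines:
--         found = False
--         for inner_tuple in tup_list:
--             if word == inner_tuple[0]:
--                 count = inner_tuple[1] + 1
--                 tup_list.remove(inner_tuple)
--                 tup_list.append((word, count))
--                 found = True
--                 break
--         if not found:
--             tup_list.append((word, 1))
--
--     return tup_list
-- ===== SOURCE B (Python) =====
-- def tup_list(lines):
--     # One counting pass + one deduplicating reverse pass (last-occurrence order),
--     # instead of A's inner scan/remove per word.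
--     items = list(lines)
--     counts = {}
--     for word in items:
--         counts[word] = counts.get(word, 0) + 1
--     result = []
--     seen = set()
--     for word in reversed(items):
--         if word not in seen:
--             seen.add(word)
--             result.append((word, counts[word]))
--     result.reverse()
--     return result
-- ===== Notes on version B (the rewrite author's own statement) =====
-- stated objective: faster
-- what changed: Replaces A's per-word inner scan and remove/append over the growing result list with one dict counting pass plus one reverse pass that keeps the first time each word is seen (its last occurrence), then reverses.
import Mathlib
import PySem

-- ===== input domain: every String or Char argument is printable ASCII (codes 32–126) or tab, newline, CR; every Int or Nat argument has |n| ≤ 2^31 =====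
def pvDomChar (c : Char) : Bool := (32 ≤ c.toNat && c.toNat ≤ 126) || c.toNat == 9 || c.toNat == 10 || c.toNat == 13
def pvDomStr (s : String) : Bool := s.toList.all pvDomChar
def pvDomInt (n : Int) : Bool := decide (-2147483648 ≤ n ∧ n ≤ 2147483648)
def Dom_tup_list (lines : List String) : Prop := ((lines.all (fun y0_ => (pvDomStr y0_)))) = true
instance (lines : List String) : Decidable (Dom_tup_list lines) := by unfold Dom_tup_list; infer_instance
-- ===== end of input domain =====

-- B replaces A's quadratic inner scan/remove with one counting pass plus one
-- deduplicating reverse pass; equal return value on every input (A is total).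

-- ===== PORT A =====
-- inner 'for inner_tuple in tup_list: if word == inner_tuple[0]: … break':
-- first tuple whose first component equals word, none if the loop finds nothing
def tupFindA (acc : List (String × Int)) (word : String) : Option (String × Int) :=
  match acc with
  | [] => none
  | t :: rest => if word == t.1 then some t else tupFindA rest word

-- one iteration of A's outer loop.  'tup_list.remove(inner_tuple)' removes the first
-- element equal to the found tuple; the tuple is in the list, so this is exactly
-- List.erase (Python's ValueError branch is unreachable here).
def tupStepA (acc : List (String × Int)) (word : String) : List (String × Int) :=
  match tupFindA acc word with
  | some t => acc.erase t ++ [(word, t.2 + 1)]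
  | none => acc ++ [(word, 1)]

def tup_list (lines : List String) : List (String × Int) :=
  lines.foldl tupStepA []

-- ===== PORT B =====
-- counts[word] = counts.get(word, 0) + 1 over all words
def tupCountsB (lines : List String) : PySem.Dict String Int :=
  lines.foldl (fun d w => d.insert w (d.getD w 0 + 1)) PySem.Dict.empty

-- the reversed pass: state = (seen, result); counts[word] is total (word is always
-- a key of counts, so getD with default 0 is exact)
def tupLoopB (counts : PySem.Dict String Int)
    (st : PySem.Set String × List (String × Int)) (word : String) :
    PySem.Set String × List (String × Int) :=
  if PySem.Set.contains st.1 word then st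
  else (PySem.Set.add st.1 word, st.2 ++ [(word, counts.getD word 0)])

def tup_list_alt (lines : List String) : List (String × Int) :=
  let counts := tupCountsB lines
  ((lines.reverse.foldl (tupLoopB counts) (PySem.Set.empty, [])).2).reverse

-- ===== PRECONDITION & SPEC =====
def Spec_tup_list (lines : List String) (out : List (String × Int)) : Prop := out = tup_list_alt lines
instance (lines : List String) (out : List (String × Int)) : Decidable (Spec_tup_list lines out) := by unfold Spec_tup_list; infer_instance

-- ===== CLAIM (what is proved, stated in full; the proofs are below) =====
def Claim_equal_tup_list : Prop := ∀ (lines : List String), Dom_tup_list lines → Spec_tup_list lines (tup_list lines)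

-- ===== LEMMAS AND PROOFS =====

-- canonical form both programs compute: words in last-occurrence order, paired
-- with their total multiplicity
def tupKeys (lines : List String) : List String :=
  (PySem.Set.ofList lines.reverse).reverse

def tupCanon (lines : List String) : List (String × Int) :=
  (tupKeys lines).map (fun w => (w, (lines.count w : Int)))

theorem tupKeys_nodup (lines : List String) : (tupKeys lines).Nodup := by
  simp [tupKeys, PySem.Set.nodup_ofList]

theorem mem_tupKeys (lines : List String) (w : String) : w ∈ tupKeys lines ↔ w ∈ lines := by
  simp [tupKeys, PySem.Set.mem_ofList]

theorem tupKeys_append_singleton (q : List String) (w : String) :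
    tupKeys (q ++ [w]) = (tupKeys q).erase w ++ [w] := by
  have h1 : tupKeys (q ++ [w]) = (PySem.Set.discard (PySem.Set.ofList q.reverse) w).reverse ++ [w] := by
    simp [tupKeys, PySem.Set.ofList_cons]
  have h2 : PySem.Set.discard (PySem.Set.ofList q.reverse) w
      = (PySem.Set.ofList q.reverse).filter (fun y => !(y == w)) := by
    simp [PySem.Set.discard]
  have h3 : (tupKeys q).erase w = (tupKeys q).filter (fun y => !(y == w)) := by
    have := List.Nodup.erase_eq_filter (tupKeys_nodup q) w
    simpa [bne] using this
  rw [h1, h2, h3]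
  simp [tupKeys, List.filter_reverse]

-- count bookkeeping after appending one word
theorem count_append_singleton (q : List String) (w x : String) :
    (q ++ [w]).count x = q.count x + (if x = w then 1 else 0) := by
  by_cases h : x = w
  · subst h; simp [List.count_append]
  · have : List.count x [w] = 0 := List.count_eq_zero.mpr (by simp [h])
    simp [List.count_append, h, this]

-- ===== A-side =====

theorem tupFindA_map (L : List String) (h : String → Int) (w : String) :
    tupFindA (L.map (fun w' => (w', h w'))) w
      = if w ∈ L then some (w, h w) else none := by
  induction L with
  | nil => simp [tupFindA]
  | cons a rest ih =>
    by_cases hw : w = a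
    · subst hw; simp [tupFindA]
    · simp [tupFindA, hw, ih]

theorem tupStepA_canon (q : List String) (w : String) :
    tupStepA (tupCanon q) w = tupCanon (q ++ [w]) := by
  have hfind := tupFindA_map (tupKeys q) (fun w' => (q.count w' : Int)) w
  by_cases hw : w ∈ q
  · have hwK : w ∈ tupKeys q := (mem_tupKeys q w).mpr hw
    have hinj : Function.Injective (fun w' : String => (w', (q.count w' : Int))) := by
      intro a b hab; simpa using congrArg Prod.fst hab
    have herase : (tupCanon q).erase (w, (q.count w : Int))
        = ((tupKeys q).erase w).map (fun w' => (w', (q.count w' : Int))) := by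
      simpa [tupCanon] using (List.map_erase hinj (l := tupKeys q) (a := w)).symm
    have hnotmem : w ∉ (tupKeys q).erase w := (tupKeys_nodup q).not_mem_erase
    rw [show tupStepA (tupCanon q) w
        = (tupCanon q).erase (w, (q.count w : Int)) ++ [(w, (q.count w : Int) + 1)] by
      simp [tupStepA, tupCanon, hfind, hwK]]
    rw [herase]
    rw [tupCanon, tupKeys_append_singleton]
    rw [List.map_append]
    congr 1
    · apply List.map_congr_left
      intro x hx
      have hxw : x ≠ w := fun h => hnotmem (h ▸ hx)
      rw [count_append_singleton]; simp [hxw]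
    · simp only [List.map_cons, List.map_nil]
      rw [count_append_singleton]; simp
  · have hwK : w ∉ tupKeys q := fun h => hw ((mem_tupKeys q w).mp h)
    have hKeq : tupKeys (q ++ [w]) = tupKeys q ++ [w] := by
      rw [tupKeys_append_singleton, List.erase_of_not_mem hwK]
    rw [show tupStepA (tupCanon q) w = tupCanon q ++ [(w, 1)] by
      simp [tupStepA, tupCanon, hfind, hwK]]
    have hrhs : tupCanon (q ++ [w])
        = (tupKeys q).map (fun w' => (w', ((q ++ [w]).count w' : Int))) ++ [(w, ((q ++ [w]).count w : Int))] := by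
      rw [tupCanon, hKeq, List.map_append]; rfl
    rw [hrhs]
    congr 1
    · apply List.map_congr_left
      intro x hx
      have hxw : x ≠ w := fun h => hwK (h ▸ hx)
      rw [count_append_singleton]; simp [hxw]
    · have h0 : q.count w = 0 := List.count_eq_zero.mpr hw
      rw [count_append_singleton]; simp [h0]

theorem foldl_tupStepA (r q : List String) :
    r.foldl tupStepA (tupCanon q) = tupCanon (q ++ r) := by
  induction r generalizing q with
  | nil => simp
  | cons w rest ih =>
    simp only [List.foldl_cons, tupStepA_canon]
    rw [ih (q ++ [w])]
    simp

theorem tup_list_eq_canon (lines : List String) : tup_list lines = tupCanon lines := by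
  have h0 : tupCanon ([] : List String) = [] := by simp [tupCanon, tupKeys, PySem.Set.ofList_nil]
  have := foldl_tupStepA lines []
  simpa [tup_list, h0] using this

-- ===== B-side =====

theorem tupCountsB_getD (lines : List String) (w : String) :
    (tupCountsB lines).getD w 0 = (lines.count w : Int) := by
  simpa [tupCountsB] using
    PySem.Dict.getD_foldl_insert_add_one (l := lines) (d := PySem.Dict.empty) (v := w)

theorem foldl_tupLoopB (lines : List String) (r q : List String) :
    r.foldl (tupLoopB (tupCountsB lines))
        (PySem.Set.ofList q, (PySem.Set.ofList q).map (fun w => (w, (lines.count w : Int))))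
      = (PySem.Set.ofList (q ++ r),
         (PySem.Set.ofList (q ++ r)).map (fun w => (w, (lines.count w : Int)))) := by
  induction r generalizing q with
  | nil => simp
  | cons w rest ih =>
    have hstep : tupLoopB (tupCountsB lines)
        (PySem.Set.ofList q, (PySem.Set.ofList q).map (fun w => (w, (lines.count w : Int)))) w
        = (PySem.Set.ofList (q ++ [w]),
           (PySem.Set.ofList (q ++ [w])).map (fun w => (w, (lines.count w : Int)))) := by
      rw [PySem.Set.ofList_append_singleton]
      by_cases hq : w ∈ q
      · have hw : w ∈ PySem.Set.ofList q := (PySem.Set.mem_ofList q w).mpr hq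
        simp [tupLoopB, hq]
      · have hw : w ∉ PySem.Set.ofList q := fun h => hq ((PySem.Set.mem_ofList q w).mp h)
        simp [tupLoopB, hq, tupCountsB_getD]
    simp only [List.foldl_cons, hstep]
    rw [ih (q ++ [w])]
    simp

theorem tup_list_alt_eq_canon (lines : List String) : tup_list_alt lines = tupCanon lines := by
  have h := foldl_tupLoopB lines lines.reverse []
  have hempty : (PySem.Set.empty : PySem.Set String) = PySem.Set.ofList [] := rfl
  simp only [List.nil_append] at h
  rw [tup_list_alt]
  show ((lines.reverse.foldl (tupLoopB (tupCountsB lines)) (PySem.Set.empty, [])).2).reverse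
      = tupCanon lines
  rw [show ((PySem.Set.empty : PySem.Set String), ([] : List (String × Int)))
      = (PySem.Set.ofList ([] : List String),
         (PySem.Set.ofList ([] : List String)).map (fun w => (w, (lines.count w : Int)))) by
    simp [PySem.Set.ofList_nil]]
  rw [h]
  simp [tupCanon, tupKeys, List.map_reverse]

-- ===== VERDICT (by name: the statement is the Claim_ definition above) =====
theorem tup_list_spec : Claim_equal_tup_list := by
  intro lines _
  unfold Spec_tup_list
  rw [tup_list_eq_canon, tup_list_alt_eq_canon]
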